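-- pv_equiv track=rewrite | github.com/SalomonMetre/detecterreur | src/detecterreur/ortographe/letter_order.py | _can_be_obtained_by_swapping
-- ===== SOURCE A (Python) =====
-- def _can_be_obtained_by_swapping(word: str, candidate: str) -> bool:
--     if len(word) != len(candidate):
--         return False
--
--     for i in range(len(word) - 1):
--         swapped = list(word)
--         swapped[i], swapped[i + 1] = swapped[i + 1], swapped[i]
--         if "".join(swapped) == candidate:
--             return True
--     return False
-- ===== SOURCE B (Python) =====
-- def _can_be_obtained_by_swapping(word: str, candidate: str) -> bool:
--     if len(word) != len(candidate):
--         return False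
--     if word == candidate:
--         # a swap of two equal adjacent characters leaves the word unchanged
--         return any(a == b for a, b in zip(word, word[1:]))
--     i = 0
--     while word[i] == candidate[i]:
--         i += 1
--     if i + 1 == len(word):
--         return False
--     return (word[i] == candidate[i + 1] and word[i + 1] == candidate[i]
--             and word[i + 2:] == candidate[i + 2:])
-- ===== Notes on version B (the rewrite author's own statement) =====
-- stated objective: faster
-- what changed: Instead of materialising and comparing a swapped copy of the word for every position (O(n) work per position), B scans once to the first mismatch and checks a single adjacent cross-swap plus equality of the remaining suffix; the equal-strings case is handled by looking for an adjacent equal pair.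
import Mathlib
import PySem

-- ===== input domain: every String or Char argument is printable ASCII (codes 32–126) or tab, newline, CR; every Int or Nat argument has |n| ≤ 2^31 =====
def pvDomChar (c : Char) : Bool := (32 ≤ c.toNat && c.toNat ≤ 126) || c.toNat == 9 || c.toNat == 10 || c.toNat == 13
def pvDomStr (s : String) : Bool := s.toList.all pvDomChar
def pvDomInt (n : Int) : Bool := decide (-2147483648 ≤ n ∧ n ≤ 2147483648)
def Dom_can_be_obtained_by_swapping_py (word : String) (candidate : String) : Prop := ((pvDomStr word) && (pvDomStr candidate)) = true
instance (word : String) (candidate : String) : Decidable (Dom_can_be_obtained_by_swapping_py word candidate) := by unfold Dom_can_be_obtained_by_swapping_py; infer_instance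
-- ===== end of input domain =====

-- B replaces A's per-position build-a-swapped-copy-and-compare loop (quadratic) by a single
-- scan to the first mismatch followed by one adjacent cross-swap check and a suffix comparison.

-- ===== PORT A =====
-- swapped = list(word); swapped[i], swapped[i+1] = swapped[i+1], swapped[i]
-- (both right-hand sides read the original word; indices are always in range in A's loop,
-- so List.getD with a dummy default is exact here)
def pvSwapA (w : List Char) (i : Nat) : List Char :=
  (w.set i (w.getD (i + 1) ' ')).set (i + 1) (w.getD i ' ')

def pvLoopA (w c : List Char) : Bool :=
  (List.range (w.length - 1)).any (fun i => pvSwapA w i == c)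

def can_be_obtained_by_swapping_py (word : String) (candidate : String) : Bool :=
  if word.toList.length ≠ candidate.toList.length then false
  else pvLoopA word.toList candidate.toList

-- ===== PORT B =====
-- the while loop advancing i past equal characters, then the final adjacent-swap +
-- suffix-equality check (word[i+2:] and candidate[i+2:] are the remaining tails)
def pvAltGo : List Char → List Char → Bool
  | a :: w, c :: cand =>
    if a = c then pvAltGo w cand
    else
      match w, cand with
      | b :: w', d :: cand' => a == d && b == c && w' == cand'
      | _, _ => false
  | _, _ => false

def can_be_obtained_by_swapping_py_alt (word : String) (candidate : String) : Bool :=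
  if word.toList.length ≠ candidate.toList.length then false
  else if word.toList = candidate.toList then
    -- any(a == b for a, b in zip(word, word[1:]))
    (word.toList.zip word.toList.tail).any (fun p => p.1 == p.2)
  else pvAltGo word.toList candidate.toList

-- ===== PRECONDITION & SPEC =====
def Spec_can_be_obtained_by_swapping_py (word : String) (candidate : String) (out : Bool) : Prop := out = can_be_obtained_by_swapping_py_alt word candidate
instance (word : String) (candidate : String) (out : Bool) : Decidable (Spec_can_be_obtained_by_swapping_py word candidate out) := by unfold Spec_can_be_obtained_by_swapping_py; infer_instance

-- ===== CLAIM (what is proved, stated in full; the proofs are below) =====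
def Claim_equal_can_be_obtained_by_swapping_py : Prop := ∀ (word : String) (candidate : String), Dom_can_be_obtained_by_swapping_py word candidate → Spec_can_be_obtained_by_swapping_py word candidate (can_be_obtained_by_swapping_py word candidate)

-- ===== LEMMAS AND PROOFS =====

theorem pvSwapA_cons_succ (a : Char) (w : List Char) (i : Nat) :
    pvSwapA (a :: w) (i + 1) = a :: pvSwapA w i := by
  simp [pvSwapA, List.getD]

theorem pvSwapA_cons₂_zero (a b : Char) (w : List Char) :
    pvSwapA (a :: b :: w) 0 = b :: a :: w := by
  simp [pvSwapA, List.getD]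

theorem pv_any_and_left {α : Type} (x : Bool) (g : α → Bool) (l : List α) :
    l.any (fun i => x && g i) = (x && l.any g) := by
  cases x <;> simp

theorem pv_beq_symm_and (a b : Char) : ((b == a) && (a == b)) = (a == b) := by
  by_cases h : a = b
  · simp [h]
  · simp [h]

theorem pvLoopA_cons (a b c0 c1 : Char) (w c : List Char) :
    pvLoopA (a :: b :: w) (c0 :: c1 :: c) =
      (((b == c0 && a == c1) && w == c) || (a == c0 && pvLoopA (b :: w) (c1 :: c))) := by
  unfold pvLoopA
  have h : (a :: b :: w).length - 1 = ((b :: w).length - 1) + 1 := by simp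
  rw [h, List.range_succ_eq_map]
  simp only [List.any_cons, List.any_map, Function.comp_def]
  have h0 : (pvSwapA (a :: b :: w) 0 == c0 :: c1 :: c) = ((b == c0 && a == c1) && w == c) := by
    rw [pvSwapA_cons₂_zero]
    simp [Bool.and_assoc]
  rw [h0]
  have h1 : ∀ i : Nat, (pvSwapA (a :: b :: w) (i + 1) == c0 :: c1 :: c)
      = (a == c0 && (pvSwapA (b :: w) i == c1 :: c)) := by
    intro i
    rw [pvSwapA_cons_succ]
    simp
  simp only [Nat.succ_eq_add_one, h1, pv_any_and_left]

-- the single characterisation both ports compute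
def pvRHS (w c : List Char) : Bool :=
  if w = c then (w.zip w.tail).any (fun p => p.1 == p.2) else pvAltGo w c

theorem pvLoopA_eq (w : List Char) : ∀ c : List Char, w.length = c.length →
    pvLoopA w c = pvRHS w c := by
  induction w with
  | nil =>
    intro c hc
    have : c = [] := by cases c <;> simp_all
    subst this
    simp [pvLoopA, pvRHS]
  | cons a w ih =>
    intro c hc
    match w, c with
    | _, [] => simp at hc
    | [], c0 :: c1 :: c' => simp at hc
    | [], [c0] =>
      by_cases h : a = c0 <;> simp [pvLoopA, pvRHS, pvAltGo, h]
    | b :: w', [c0] => simp at hc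
    | b :: w', c0 :: c1 :: c' =>
      have hlen : (b :: w').length = (c1 :: c').length := by simpa using hc
      rw [pvLoopA_cons, ih (c1 :: c') hlen]
      by_cases hac : a = c0
      · subst hac
        by_cases htail : (b :: w' : List Char) = c1 :: c'
        · have hb : b = c1 := ((List.cons.injEq b w' c1 c').mp htail).1
          have hw : w' = c' := ((List.cons.injEq b w' c1 c').mp htail).2
          subst hb; subst hw
          simp [pvRHS, pv_beq_symm_and]
        · have hne : (a :: b :: w' : List Char) ≠ a :: c1 :: c' := by
            intro h
            exact htail ((List.cons.injEq _ _ _ _).mp h).2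
          have hfd : ((b == a && a == c1) && (w' == c' : Bool)) = false := by
            by_cases h1 : b = a
            · by_cases h2 : a = c1
              · by_cases h3 : w' = c'
                · exact absurd (by rw [h3]; rw [h1, h2]) htail
                · simp [h3]
              · simp [h2]
            · simp [h1]
          rw [hfd, Bool.false_or]
          have hA : (a == a) = true := by simp
          rw [hA, Bool.true_and]
          simp [pvRHS, htail, hne, pvAltGo]
      · have hne : (a :: b :: w' : List Char) ≠ c0 :: c1 :: c' := by
          intro h
          exact hac ((List.cons.injEq _ _ _ _).mp h).1
        have hA : (a == c0) = false := by simp [hac]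
        rw [hA, Bool.false_and, Bool.or_false]
        simp only [pvRHS, if_neg hne]
        have : pvAltGo (a :: b :: w') (c0 :: c1 :: c')
            = ((b == c0 && a == c1) && w' == c') := by
          simp [pvAltGo, hac, Bool.and_comm, Bool.and_left_comm]
        rw [this]

-- ===== VERDICT (by name: the statement is the Claim_ definition above) =====
theorem can_be_obtained_by_swapping_py_spec : Claim_equal_can_be_obtained_by_swapping_py := by
  intro word candidate _
  unfold Spec_can_be_obtained_by_swapping_py
  unfold can_be_obtained_by_swapping_py can_be_obtained_by_swapping_py_alt
  by_cases hlen : word.toList.length = candidate.toList.length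
  · rw [if_neg (fun h => h hlen), if_neg (fun h => h hlen)]
    rw [pvLoopA_eq word.toList candidate.toList hlen]
    rfl
  · rw [if_pos hlen, if_pos hlen]
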